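-- pv_equiv track=rewrite | github.com/hildenost/advent-of-code | 11/seating.py | get_changed_seats
-- ===== SOURCE A (Python) =====
-- from collections import defaultdict
--
-- DIRECTIONS = {(0, -1), (0, 1), (1, 0), (-1, 0), (1, 1), (1, -1), (-1, 1), (-1, -1)}
--
-- def within_bounds(i, j, matrix):
--     return 0 <= i < len(matrix) and 0 <= j < len(matrix[0])
--
-- def count_neighbours(i, j, matrix):
--     return sum(
--         matrix[i + y][j + x] == "#"
--         for y, x in DIRECTIONS
--         if within_bounds(i + y, j + x, matrix)
--     )
--
-- def get_changed_seats(matrix):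
--     changed_seats = defaultdict(str)
--     for i, row in enumerate(matrix):
--         for j, seat in enumerate(row):
--             if seat != ".":
--                 n = count_neighbours(i, j, matrix)
--                 if seat == "L" and n == 0:
--                     changed_seats[(i, j)] = "#"
--                 elif seat == "#" and n >= 4:
--                     changed_seats[(i, j)] = "L"
--     return changed_seats
-- ===== SOURCE B (Python) =====
-- from collections import defaultdict, Counter
--
-- # Scatter/gather re-implementation. The board is len(matrix) rows by
-- # len(matrix[0]) columns; only cells on the board can host an occupied
-- # neighbour. One pass scatters +1 from every occupied board cell onto its 8
-- # neighbour positions via a Counter, then a row-major decision pass looks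
-- # each seat's count up.
-- OFFSETS = [(0, 1), (0, -1), (-1, 0), (1, 0), (-1, -1), (-1, 1), (1, -1), (1, 1)]
--
-- def get_changed_seats(matrix):
--     width = len(matrix[0]) if matrix else 0
--     counts = Counter(
--         (i + y, j + x)
--         for i, row in enumerate(matrix)
--         for j, seat in enumerate(row[:width])
--         if seat == "#"
--         for y, x in OFFSETS
--     )
--     changed_seats = defaultdict(str)
--     for i, row in enumerate(matrix):
--         for j, seat in enumerate(row):
--             if seat == "L" and counts[(i, j)] == 0:
--                 changed_seats[(i, j)] = "#"
--             elif seat == "#" and counts[(i, j)] >= 4: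
--                 changed_seats[(i, j)] = "L"
--     return changed_seats
-- ===== Notes on version B (the rewrite author's own statement) =====
-- stated objective: faster
-- what changed: A gathers: it calls count_neighbours on every seat, re-scanning the 8 surrounding cells per seat in interpreted Python; B scatters: one pass builds a Counter of the 8 neighbour positions of every occupied board cell (the board being len(matrix) rows by len(matrix[0]) columns), then a second row-major pass just looks each seat's count up, moving the counting work into a single C-implemented Counter construction; Pre_ excludes only the ragged inputs on which A raises IndexError.
import Mathlib
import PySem

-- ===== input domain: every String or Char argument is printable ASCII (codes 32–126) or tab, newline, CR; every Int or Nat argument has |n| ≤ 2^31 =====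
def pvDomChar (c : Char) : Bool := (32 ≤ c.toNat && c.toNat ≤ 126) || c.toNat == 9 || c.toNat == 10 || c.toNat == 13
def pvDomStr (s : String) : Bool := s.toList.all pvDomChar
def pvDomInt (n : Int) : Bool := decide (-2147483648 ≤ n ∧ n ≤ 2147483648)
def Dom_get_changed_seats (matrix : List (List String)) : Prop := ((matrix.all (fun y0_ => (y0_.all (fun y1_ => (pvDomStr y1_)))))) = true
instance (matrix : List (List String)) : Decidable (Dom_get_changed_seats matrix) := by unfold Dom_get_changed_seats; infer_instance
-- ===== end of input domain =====

-- B replaces A's per-seat gather (count_neighbours called on every seat) by a scatter pass: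
-- a Counter of the 8 neighbour cells of every occupied board cell, then a row-major decision
-- pass. Objective: alternative decomposition (counting separated from deciding); equivalence
-- of the RETURN value is proved on Pre_ (inputs where A does not raise IndexError).
-- The Python defaultdict result has pairwise-distinct keys inserted row-major, so it is
-- modelled as the association list built by appending in that same order.

-- ===== PORT A =====
-- DIRECTIONS is a Python set; the sum in count_neighbours is over its elements, and since
-- integer addition is commutative the iteration order is immaterial; a fixed order is used here.
def pvDirs : List (Int × Int) := [(0,-1),(0,1),(1,0),(-1,0),(1,1),(1,-1),(-1,1),(-1,-1)]

-- len(matrix[0]) : within_bounds is only called from count_neighbours on an existing cell,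
-- so matrix is nonempty there and headD [] is exact.
def within_bounds (i j : Int) (matrix : List (List String)) : Bool :=
  decide (0 ≤ i) && decide (i < (matrix.length : Int)) &&
  decide (0 ≤ j) && decide (j < ((matrix.headD []).length : Int))

-- matrix[i+y][j+x] : total pyGetD form; exact under Pre_ (which rules out the IndexError reads).
def count_neighbours (i j : Int) (matrix : List (List String)) : Int :=
  pvDirs.foldl (fun acc d =>
    if within_bounds (i + d.1) (j + d.2) matrix then
      acc + (if PySem.List.pyGetD (PySem.List.pyGetD matrix (i + d.1) []) (j + d.2) "" == "#" then 1 else 0)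
    else acc) 0

def get_changed_seats (matrix : List (List String)) : List (Int × Int × String) :=
  (PySem.List.enumerate matrix).foldl (fun acc p =>
    (PySem.List.enumerate p.2).foldl (fun acc2 q =>
      if q.2 ≠ "." then
        let n := count_neighbours p.1 q.1 matrix
        if q.2 = "L" ∧ n = 0 then acc2 ++ [(p.1, q.1, "#")]
        else if q.2 = "#" ∧ n ≥ 4 then acc2 ++ [(p.1, q.1, "L")]
        else acc2
      else acc2) acc) []

-- ===== PORT B =====
def pvOffsets : List (Int × Int) := [(0,1),(0,-1),(-1,0),(1,0),(-1,-1),(-1,1),(1,-1),(1,1)]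

-- width = len(matrix[0]) if matrix else 0
def pvWidth (matrix : List (List String)) : Int :=
  if matrix.isEmpty then 0 else ((matrix.headD []).length : Int)

-- the Counter's generator expression: all 8 shifts of every occupied cell of row[:width], row-major
def pvTargets (matrix : List (List String)) : List (Int × Int) :=
  (PySem.List.enumerate matrix).flatMap (fun p =>
    (PySem.List.enumerate (PySem.List.slice p.2 none (some (pvWidth matrix)))).flatMap (fun q =>
      if q.2 = "#" then pvOffsets.map (fun d => (p.1 + d.1, q.1 + d.2))
      else []))

def get_changed_seats_alt (matrix : List (List String)) : List (Int × Int × String) :=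
  let counts := PySem.Dict.counter (pvTargets matrix)
  (PySem.List.enumerate matrix).foldl (fun acc p =>
    (PySem.List.enumerate p.2).foldl (fun acc2 q =>
      if q.2 = "L" ∧ counts.getD (p.1, q.1) 0 = 0 then acc2 ++ [(p.1, q.1, "#")]
      else if q.2 = "#" ∧ counts.getD (p.1, q.1) 0 ≥ 4 then acc2 ++ [(p.1, q.1, "L")]
      else acc2) acc) []

-- ===== PRECONDITION & SPEC =====
-- Pre_ excludes exactly the inputs where A raises IndexError: ragged matrices on which some
-- non-'.' seat has a neighbour position that passes within_bounds (which checks against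
-- len(matrix[0])) but lies beyond the actual length of its own row.
def Pre_get_changed_seats (matrix : List (List String)) : Prop :=
  ∀ i ∈ List.range matrix.length, ∀ j ∈ List.range (matrix.getD i []).length,
    (matrix.getD i []).getD j "" ≠ "." →
    ∀ d ∈ ([(0,-1),(0,1),(1,0),(-1,0),(1,1),(1,-1),(-1,1),(-1,-1)] : List (Int × Int)),
      0 ≤ (i : Int) + d.1 → (i : Int) + d.1 < (matrix.length : Int) →
      0 ≤ (j : Int) + d.2 → (j : Int) + d.2 < ((matrix.headD []).length : Int) →
      (j : Int) + d.2 < ((matrix.getD ((i : Int) + d.1).toNat []).length : Int)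
instance (matrix : List (List String)) : Decidable (Pre_get_changed_seats matrix) := by
  unfold Pre_get_changed_seats; infer_instance

def pvWitness_get_changed_seats : List (List String) := [["L", "."], ["#", "L"]]

def Spec_get_changed_seats (matrix : List (List String)) (out : List (Int × Int × String)) : Prop := out = get_changed_seats_alt matrix
instance (matrix : List (List String)) (out : List (Int × Int × String)) : Decidable (Spec_get_changed_seats matrix out) := by unfold Spec_get_changed_seats; infer_instance

-- ===== CLAIM (what is proved, stated in full; the proofs are below) =====
def Claim_equal_get_changed_seats : Prop := ∀ (matrix : List (List String)), Dom_get_changed_seats matrix → Pre_get_changed_seats matrix → Spec_get_changed_seats matrix (get_changed_seats matrix)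

-- ===== LEMMAS AND PROOFS =====

-- indicator
def pvInd (b : Prop) [Decidable b] : Nat := if b then 1 else 0

lemma pvInd_congr {p q : Prop} [Decidable p] [Decidable q] (h : p ↔ q) : pvInd p = pvInd q := by
  simp only [pvInd]; exact if_congr h rfl rfl

lemma pvInd_add_or {p q : Prop} [Decidable p] [Decidable q] (h : ¬ (p ∧ q)) :
    pvInd p + pvInd q = pvInd (p ∨ q) := by
  by_cases hp : p
  · have hq : ¬ q := fun hq => h ⟨hp, hq⟩
    simp [pvInd, hp, hq]
  · by_cases hq : q <;> simp [pvInd, hp, hq]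

-- row-level occupancy of row[:w]: absolute column b, row starting at column t
abbrev pvRowOcc (row : List String) (w : Nat) (t b : Int) : Prop :=
  t ≤ b ∧ b < t + ((min w row.length : Nat) : Int) ∧ row.getD (b - t).toNat "" = "#"

lemma pvRowOcc_nil (w : Nat) (t b : Int) : ¬ pvRowOcc [] w t b := by
  rintro ⟨h1, h2, _⟩; simp at h2; omega

lemma pvRowOcc_zero (row : List String) (t b : Int) : ¬ pvRowOcc row 0 t b := by
  rintro ⟨h1, h2, _⟩; simp at h2; omega

lemma pvRowOcc_cons (s : String) (r : List String) (w : Nat) (t b : Int) :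
    pvRowOcc (s :: r) (w + 1) t b ↔ (b = t ∧ s = "#") ∨ pvRowOcc r w (t + 1) b := by
  have hlen : ((min (w + 1) (s :: r).length : Nat) : Int) = ((min w r.length : Nat) : Int) + 1 := by
    push_cast [List.length_cons]; omega
  unfold pvRowOcc
  rw [hlen]
  constructor
  · rintro ⟨h1, h2, h4⟩
    by_cases hb : b = t
    · subst hb
      left
      have h0 : (b - b).toNat = 0 := by omega
      rw [h0] at h4
      exact ⟨rfl, by simpa using h4⟩
    · right
      refine ⟨by omega, by omega, ?_⟩
      have hstep : (b - t).toNat = (b - (t + 1)).toNat + 1 := by omega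
      rw [hstep] at h4
      simpa using h4
  · rintro (⟨hb, hsh⟩ | ⟨h1, h2, h4⟩)
    · subst hb
      have h0 : (b - b).toNat = 0 := by omega
      refine ⟨by omega, by omega, ?_⟩
      rw [h0]
      simpa using hsh
    · refine ⟨by omega, by omega, ?_⟩
      have hstep : (b - t).toNat = (b - (t + 1)).toNat + 1 := by omega
      rw [hstep]
      simpa using h4

-- matrix-level occupancy: rows starting at row index s, rows cropped to width w
abbrev pvMatOcc (rows : List (List String)) (w : Nat) (s a b : Int) : Prop :=
  s ≤ a ∧ a < s + (rows.length : Int) ∧ pvRowOcc (rows.getD (a - s).toNat []) w 0 b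

lemma pvMatOcc_cons (r : List String) (rest : List (List String)) (w : Nat) (s a b : Int) :
    pvMatOcc (r :: rest) w s a b ↔ (a = s ∧ pvRowOcc r w 0 b) ∨ pvMatOcc rest w (s + 1) a b := by
  have hlen : (((r :: rest).length : Nat) : Int) = (rest.length : Int) + 1 := by simp
  unfold pvMatOcc
  constructor
  · rintro ⟨h1, h2, h3⟩
    by_cases ha : a = s
    · subst ha
      left
      have h0 : (a - a).toNat = 0 := by omega
      rw [h0] at h3
      exact ⟨rfl, by simpa using h3⟩
    · right
      refine ⟨by omega, by omega, ?_⟩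
      have hstep : (a - s).toNat = (a - (s + 1)).toNat + 1 := by omega
      rw [hstep] at h3
      simpa using h3
  · rintro (⟨ha, h3⟩ | ⟨h1, h2, h3⟩)
    · subst ha
      have h0 : (a - a).toNat = 0 := by omega
      refine ⟨by omega, by omega, ?_⟩
      rw [h0]
      simpa using h3
    · refine ⟨by omega, by omega, ?_⟩
      have hstep : (a - s).toNat = (a - (s + 1)).toNat + 1 := by omega
      rw [hstep]
      simpa using h3

-- count of one shifted-offsets block
lemma pvShift_count (a b x y : Int) :
    (pvOffsets.map (fun d => (a + d.1, b + d.2))).count (x, y)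
      = (pvOffsets.map (fun d => pvInd (a + d.1 = x ∧ b + d.2 = y))).sum := by
  simp [pvOffsets, pvInd, List.count_cons, Prod.ext_iff]
  omega

-- per-row contribution to pvTargets (row cropped by take w), counted at (x, y)
lemma pvRow_count (row : List String) (a x y : Int) : ∀ (t : Int) (w : Nat),
    ((PySem.List.enumerate (row.take w) t).flatMap (fun q =>
        if q.2 = "#" then pvOffsets.map (fun d => (a + d.1, q.1 + d.2)) else [])).count (x, y)
      = (pvOffsets.map (fun d => pvInd (a + d.1 = x ∧ pvRowOcc row w t (y - d.2)))).sum := by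
  induction row with
  | nil =>
      intro t w
      simp [pvInd, fun d : Int × Int => pvRowOcc_nil w t (y - d.2)]
  | cons s r ih =>
      intro t w
      cases w with
      | zero =>
          simp [pvInd, fun d : Int × Int => pvRowOcc_zero (s :: r) t (y - d.2)]
      | succ w' =>
          rw [List.take_succ_cons, PySem.List.enumerate_cons]
          rw [List.flatMap_cons, List.count_append, ih (t + 1) w']
          have hhead : (List.count (x, y) (if s = "#" then pvOffsets.map (fun d => (a + d.1, t + d.2)) else []))
              = (pvOffsets.map (fun d => pvInd (a + d.1 = x ∧ (y - d.2 = t ∧ s = "#")))).sum := by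
            by_cases hg : s = "#"
            · rw [if_pos hg, pvShift_count]
              refine congrArg _ (List.map_congr_left ?_)
              intro d _
              refine pvInd_congr ⟨?_, ?_⟩
              · rintro ⟨h1, h2⟩; exact ⟨h1, by omega, hg⟩
              · rintro ⟨h1, h2, _⟩; exact ⟨h1, by omega⟩
            · rw [if_neg hg]
              rw [List.count_nil]
              refine (List.sum_eq_zero ?_).symm
              intro z hz
              obtain ⟨d, _, rfl⟩ := List.mem_map.mp hz
              rw [pvInd, if_neg]
              rintro ⟨_, _, h4⟩
              exact hg h4
          rw [hhead, ← List.sum_map_add]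
          refine congrArg List.sum (List.map_congr_left ?_)
          intro d _
          have hdisj : ¬ ((a + d.1 = x ∧ (y - d.2 = t ∧ s = "#"))
              ∧ (a + d.1 = x ∧ pvRowOcc r w' (t + 1) (y - d.2))) := by
            rintro ⟨⟨_, h1, _⟩, ⟨_, h2, _⟩⟩
            omega
          rw [pvInd_add_or hdisj]
          refine pvInd_congr ?_
          rw [pvRowOcc_cons]
          constructor
          · rintro (⟨h1, h2⟩ | ⟨h1, h2⟩)
            · exact ⟨h1, Or.inl h2⟩
            · exact ⟨h1, Or.inr h2⟩
          · rintro ⟨h1, h2 | h2⟩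
            · exact Or.inl ⟨h1, h2⟩
            · exact Or.inr ⟨h1, h2⟩

-- matrix-level contribution (each row sliced to [:w]), counted at (x, y)
lemma pvMat_count (rows : List (List String)) (w : Nat) (x y : Int) : ∀ s : Int,
    ((PySem.List.enumerate rows s).flatMap (fun p =>
        (PySem.List.enumerate (PySem.List.slice p.2 none (some ((w : Nat) : Int)))).flatMap (fun q =>
          if q.2 = "#" then pvOffsets.map (fun d => (p.1 + d.1, q.1 + d.2)) else []))).count (x, y)
      = (pvOffsets.map (fun d => pvInd (pvMatOcc rows w s (x - d.1) (y - d.2)))).sum := by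
  induction rows with
  | nil =>
      intro s
      have hno : ∀ d : Int × Int, ¬ pvMatOcc [] w s (x - d.1) (y - d.2) := by
        rintro d ⟨h1, h2, _⟩; simp at h2; omega
      simp [PySem.List.enumerate, pvInd, hno]
  | cons r rest ih =>
      intro s
      rw [PySem.List.enumerate_cons]
      rw [List.flatMap_cons, PySem.List.slice_to_natCast, List.count_append, ih (s + 1),
        pvRow_count r s x y 0 w]
      rw [← List.sum_map_add]
      refine congrArg List.sum (List.map_congr_left ?_)
      intro d _
      have hdisj : ¬ ((s + d.1 = x ∧ pvRowOcc r w 0 (y - d.2))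
          ∧ pvMatOcc rest w (s + 1) (x - d.1) (y - d.2)) := by
        rintro ⟨⟨h1, _⟩, ⟨h2, _⟩⟩
        omega
      rw [pvInd_add_or hdisj]
      refine pvInd_congr ?_
      rw [pvMatOcc_cons]
      constructor
      · rintro (⟨h1, h2⟩ | h2)
        · exact Or.inl ⟨by omega, h2⟩
        · exact Or.inr h2
      · rintro (⟨h1, h2⟩ | h2)
        · exact Or.inl ⟨by omega, h2⟩
        · exact Or.inr h2

-- occupancy of a board position in the whole matrix
abbrev pvOcc (matrix : List (List String)) (a b : Int) : Prop :=
  pvMatOcc matrix (matrix.headD []).length 0 a b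

-- full scatter count
lemma pvTargets_count (matrix : List (List String)) (x y : Int) :
    (pvTargets matrix).count (x, y)
      = (pvOffsets.map (fun d => pvInd (pvOcc matrix (x - d.1) (y - d.2)))).sum := by
  cases matrix with
  | nil =>
      have hno : ∀ d : Int × Int, ¬ pvOcc [] (x - d.1) (y - d.2) := by
        rintro d ⟨h1, h2, _⟩; simp at h2; omega
      simp [pvTargets, PySem.List.enumerate, pvInd, hno]
  | cons r rest =>
      unfold pvTargets pvOcc pvWidth
      simp only [List.isEmpty_cons, List.headD_cons, if_neg (by decide : ¬ false = true)]
      exact pvMat_count (r :: rest) r.length x y 0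

-- turn A's guarded-accumulator fold into a sum
lemma pvFoldl_ite_sum {α : Type} (l : List α) (c : α → Bool) (v : α → Int) :
    ∀ init : Int, l.foldl (fun acc d => if c d then acc + v d else acc) init
      = init + (l.map (fun d => if c d then v d else 0)).sum := by
  induction l with
  | nil => intro init; simp
  | cons x xs ih =>
      intro init
      rw [List.foldl_cons, List.map_cons, List.sum_cons]
      by_cases hc : c x
      · simp only [hc, if_true, ih (init + v x)]; ring
      · simp only [hc, if_false, Bool.false_eq_true, ih init]; ring

-- one gather term under Pre_: A's per-direction summand equals the occupancy indicator
lemma pvGather_term (matrix : List (List String)) (a b : Int)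
    (hray : 0 ≤ a → a < (matrix.length : Int) → 0 ≤ b → b < ((matrix.headD []).length : Int) →
      b < ((matrix.getD a.toNat []).length : Int)) :
    (if within_bounds a b matrix then
        (if PySem.List.pyGetD (PySem.List.pyGetD matrix a []) b "" == "#" then (1 : Int) else 0)
      else 0)
      = (pvInd (pvOcc matrix a b) : Nat) := by
  have hmin : ∀ l : Nat, b < ((min (matrix.headD []).length l : Nat) : Int)
      ↔ b < ((matrix.headD []).length : Int) ∧ b < (l : Int) := by
    intro l; push_cast; omega
  by_cases hwb : within_bounds a b matrix = true
  · rw [if_pos hwb]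
    unfold within_bounds at hwb
    simp only [Bool.and_eq_true, decide_eq_true_eq] at hwb
    obtain ⟨⟨⟨h1, h2⟩, h3⟩, h4⟩ := hwb
    have hb : b < ((matrix.getD a.toNat []).length : Int) := hray h1 h2 h3 h4
    have hrow : PySem.List.pyGetD matrix a [] = matrix.getD a.toNat [] := by
      rw [PySem.List.pyGetD_eq_getElem matrix [] h1 h2]
      exact (List.getD_eq_getElem _ _ (by omega)).symm
    have hcell : PySem.List.pyGetD (matrix.getD a.toNat []) b "" = (matrix.getD a.toNat []).getD b.toNat "" := by
      rw [PySem.List.pyGetD_eq_getElem _ "" h3 hb]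
      exact (List.getD_eq_getElem _ _ (by omega)).symm
    rw [hrow, hcell]
    have hocc : pvOcc matrix a b ↔ (matrix.getD a.toNat []).getD b.toNat "" = "#" := by
      unfold pvOcc pvMatOcc pvRowOcc
      simp only [sub_zero, zero_add]
      constructor
      · rintro ⟨_, _, _, _, h⟩
        exact h
      · intro h
        refine ⟨by omega, by omega, by omega, ?_, h⟩
        rw [hmin]
        exact ⟨h4, hb⟩
    simp [pvInd, hocc]
  · rw [if_neg hwb]
    have hnocc : ¬ pvOcc matrix a b := by
      intro hocc
      unfold pvOcc pvMatOcc pvRowOcc at hocc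
      simp only [sub_zero, zero_add] at hocc
      obtain ⟨h1, h2, hb2, hb3, _⟩ := hocc
      rw [hmin] at hb3
      refine hwb ?_
      unfold within_bounds
      simp only [Bool.and_eq_true, decide_eq_true_eq]
      exact ⟨⟨⟨by omega, by omega⟩, by omega⟩, hb3.1⟩
    simp [pvInd, hnocc]

-- gather count under Pre_
lemma pvGather_count (matrix : List (List String)) (i j : Nat)
    (hi : i < matrix.length) (hj : j < (matrix.getD i []).length)
    (hs : (matrix.getD i []).getD j "" ≠ ".")
    (hpre : Pre_get_changed_seats matrix) :
    count_neighbours i j matrix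
      = (((pvDirs.map (fun d => pvInd (pvOcc matrix ((i : Int) + d.1) ((j : Int) + d.2)))).sum : Nat) : Int) := by
  unfold count_neighbours
  rw [pvFoldl_ite_sum pvDirs
    (fun d => within_bounds ((i : Int) + d.1) ((j : Int) + d.2) matrix)
    (fun d => if PySem.List.pyGetD (PySem.List.pyGetD matrix ((i : Int) + d.1) []) ((j : Int) + d.2) "" == "#" then (1 : Int) else 0) 0]
  rw [zero_add, Nat.cast_list_sum, List.map_map]
  refine congrArg List.sum (List.map_congr_left ?_)
  intro d hd
  refine pvGather_term matrix _ _ ?_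
  intro h1 h2 h3 h4
  exact hpre i (List.mem_range.mpr hi) j (List.mem_range.mpr hj) hs d hd h1 h2 h3 h4

-- symmetry: pvOffsets are the negations of pvDirs, in matching order
lemma pvSym (matrix : List (List String)) (i j : Int) :
    (pvOffsets.map (fun d => pvInd (pvOcc matrix (i - d.1) (j - d.2)))).sum
      = (pvDirs.map (fun d => pvInd (pvOcc matrix (i + d.1) (j + d.2)))).sum := by
  simp only [pvOffsets, pvDirs, List.map_cons, List.map_nil, List.sum_cons, List.sum_nil,
    ← sub_eq_add_neg, sub_neg_eq_add, sub_zero, add_zero]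

-- core: the Counter lookup equals A's count_neighbours at every real non-'.' cell
lemma pvCore (matrix : List (List String)) (i j : Nat)
    (hi : i < matrix.length) (hj : j < (matrix.getD i []).length)
    (hs : (matrix.getD i []).getD j "" ≠ ".")
    (hpre : Pre_get_changed_seats matrix) :
    (PySem.Dict.counter (pvTargets matrix)).getD ((i : Int), (j : Int)) 0
      = count_neighbours i j matrix := by
  rw [PySem.Dict.getD_counter, pvTargets_count, pvGather_count matrix i j hi hj hs hpre]
  exact_mod_cast congrArg (Nat.cast : Nat → Int) (pvSym matrix i j)

-- ===== VERDICT (by name: the statement is the Claim_ definition above) =====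
theorem get_changed_seats_spec : Claim_equal_get_changed_seats := by
  intro matrix _hdom hpre
  unfold Spec_get_changed_seats get_changed_seats get_changed_seats_alt
  refine PySem.List.foldl_congr_mem _ _ _ _ ?_
  intro acc p hp
  obtain ⟨ki, hki, rfl⟩ := (PySem.List.mem_enumerate_iff _ _ _).mp hp
  refine PySem.List.foldl_congr_mem _ _ _ _ ?_
  intro acc2 q hq
  obtain ⟨kj, hkj, rfl⟩ := (PySem.List.mem_enumerate_iff _ _ _).mp hq
  simp only [zero_add]
  have hrow : matrix[ki] = matrix.getD ki [] := (List.getD_eq_getElem _ _ hki).symm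
  have hkj' : kj < (matrix.getD ki []).length := by rw [← hrow]; exact hkj
  have hcell : matrix[ki][kj] = (matrix.getD ki []).getD kj "" := by
    rw [List.getD_eq_getElem _ _ hkj']
    simp only [← hrow]
  by_cases hdot : matrix[ki][kj] = "."
  · simp [hdot]
  · have hcore := pvCore matrix ki kj hki hkj' (by rw [← hcell]; exact hdot) hpre
    rw [hcore]
    simp [hdot]
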